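-- pv_equiv track=rewrite | github.com/andrew-yin/competitive-programming | usaco-train/skidesign/skidesign.py | solve
-- ===== SOURCE A (Python) =====
-- def solve(n, hills):
--     cost = 0
--     for i in range(hills[0], hills[-1] - 16):
--         thisCost = 0
--         mini = i
--         maxi = i+17
--         for j in hills:
--             if j < i:
--                 thisCost += (i - j)**2
--             elif j > i+17:
--                 thisCost += (i + 17 - j)**2
--
--         if i == hills[0]:
--             cost = thisCost
--         else:
--             if thisCost < cost:
--                 cost = thisCost
--
--     return cost
-- ===== SOURCE B (Python) =====
-- def solve(n, hills):
--     lo0 = hills[0]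
--     hi0 = hills[-1] - 16
--     if lo0 >= hi0:
--         return 0
--     cnt = {}
--     for j in hills:
--         cnt[j] = cnt.get(j, 0) + 1
--     cL = sL = ssL = 0
--     cH = sH = ssH = 0
--     for j in hills:
--         if j < lo0:
--             cL += 1; sL += j; ssL += j * j
--         elif j > lo0 + 17:
--             cH += 1; sH += j; ssH += j * j
--     best = None
--     i = lo0
--     while i < hi0:
--         cost = (cL * i * i - 2 * i * sL + ssL
--                 + cH * (i + 17) * (i + 17) - 2 * (i + 17) * sH + ssH)
--         if best is None or cost < best:
--             best = cost
--         k = cnt.get(i, 0)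
--         cL += k; sL += k * i; ssL += k * i * i
--         k2 = cnt.get(i + 18, 0)
--         cH -= k2; sH -= k2 * (i + 18); ssH -= k2 * (i + 18) * (i + 18)
--         i += 1
--     return best
-- ===== Notes on version B (the rewrite author's own statement) =====
-- stated objective: faster
-- what changed: B replaces A's inner O(n) rescan per candidate base height with a counting dict plus incrementally maintained count/sum/sum-of-squares aggregates for the below/above sides, evaluating each candidate's cost by the closed form c*i^2 - 2*i*s + ss in O(1).
import Mathlib
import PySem

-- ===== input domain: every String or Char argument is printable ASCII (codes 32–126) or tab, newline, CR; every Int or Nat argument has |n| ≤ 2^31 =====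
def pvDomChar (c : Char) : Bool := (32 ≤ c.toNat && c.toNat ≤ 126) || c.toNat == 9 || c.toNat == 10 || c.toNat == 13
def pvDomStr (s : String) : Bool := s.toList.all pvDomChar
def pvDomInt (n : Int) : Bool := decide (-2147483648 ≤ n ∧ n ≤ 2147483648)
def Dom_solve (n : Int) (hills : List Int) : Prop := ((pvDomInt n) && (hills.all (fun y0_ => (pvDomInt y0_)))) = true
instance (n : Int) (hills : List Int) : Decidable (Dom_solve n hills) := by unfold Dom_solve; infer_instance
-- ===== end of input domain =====

-- B is faster: it keeps a counting dict and running count/sum/sum-of-squares aggregates, so each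
-- candidate base height costs O(1) instead of a full rescan of hills.

-- ===== PORT A =====
def solve (n : Int) (hills : List Int) : Int :=
  let h0 := (PySem.List.pyGet? hills 0).getD 0
  let hl := (PySem.List.pyGet? hills (-1)).getD 0
  (PySem.List.pyRange h0 (hl - 16) 1).foldl
    (fun cost i =>
      let thisCost := hills.foldl
        (fun tc j =>
          if j < i then tc + (i - j) ^ 2
          else if j > i + 17 then tc + (i + 17 - j) ^ 2
          else tc) 0
      if i = h0 then thisCost
      else if thisCost < cost then thisCost else cost) 0

-- ===== PORT B =====
def solveAltLoop (hi0 : Int) (cnt : PySem.Dict Int Int)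
    (cL sL ssL cH sH ssH : Int) (best : Option Int) (i : Int) : Nat → Option Int
  | 0 => best
  | fuel + 1 =>
    if i < hi0 then
      let cost := cL * i * i - 2 * i * sL + ssL
        + cH * (i + 17) * (i + 17) - 2 * (i + 17) * sH + ssH
      let best' := match best with
        | none => some cost
        | some b => if cost < b then some cost else some b
      let k := cnt.getD i 0
      let k2 := cnt.getD (i + 18) 0
      solveAltLoop hi0 cnt (cL + k) (sL + k * i) (ssL + k * i * i)
        (cH - k2) (sH - k2 * (i + 18)) (ssH - k2 * (i + 18) * (i + 18))
        best' (i + 1) fuel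
    else best

def solve_alt (n : Int) (hills : List Int) : Int :=
  let lo0 := (PySem.List.pyGet? hills 0).getD 0
  let hi0 := (PySem.List.pyGet? hills (-1)).getD 0 - 16
  if lo0 ≥ hi0 then 0
  else
    let cnt := hills.foldl (fun d j => d.insert j (d.getD j 0 + 1)) PySem.Dict.empty
    let st := hills.foldl
      (fun (st : Int × Int × Int × Int × Int × Int) j =>
        if j < lo0 then (st.1 + 1, st.2.1 + j, st.2.2.1 + j * j, st.2.2.2.1, st.2.2.2.2.1, st.2.2.2.2.2)
        else if j > lo0 + 17 then (st.1, st.2.1, st.2.2.1, st.2.2.2.1 + 1, st.2.2.2.2.1 + j, st.2.2.2.2.2 + j * j)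
        else st)
      ((0, 0, 0, 0, 0, 0) : Int × Int × Int × Int × Int × Int)
    (solveAltLoop hi0 cnt st.1 st.2.1 st.2.2.1 st.2.2.2.1 st.2.2.2.2.1 st.2.2.2.2.2 none lo0
      (hi0 - lo0).toNat).getD 0

-- ===== PRECONDITION & SPEC =====
-- Pre_ excludes only the empty list, on which the Python A raises IndexError at hills[0].
def Pre_solve (n : Int) (hills : List Int) : Prop := hills ≠ []
instance (n : Int) (hills : List Int) : Decidable (Pre_solve n hills) := by unfold Pre_solve; infer_instance
def pvWitness_solve : Int × List Int := (3, [1, 1, 20])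

def Spec_solve (n : Int) (hills : List Int) (out : Int) : Prop := out = solve_alt n hills
instance (n : Int) (hills : List Int) (out : Int) : Decidable (Spec_solve n hills out) := by unfold Spec_solve; infer_instance

-- ===== CLAIM (what is proved, stated in full; the proofs are below) =====
def Claim_equal_solve : Prop := ∀ (n : Int) (hills : List Int), Dom_solve n hills → Pre_solve n hills → Spec_solve n hills (solve n hills)

-- ===== LEMMAS AND PROOFS =====

-- A's inner loop, as a function of the candidate base height i
def innerCost (hills : List Int) (i : Int) : Int :=
  hills.foldl
    (fun tc j =>
      if j < i then tc + (i - j) ^ 2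
      else if j > i + 17 then tc + (i + 17 - j) ^ 2
      else tc) 0

-- the six aggregates B maintains, in specification form (per-element indicator sums)
def agL (hills : List Int) (i : Int) : Int := (hills.map (fun j => if j < i then (1 : Int) else 0)).sum
def agS (hills : List Int) (i : Int) : Int := (hills.map (fun j => if j < i then j else 0)).sum
def agSS (hills : List Int) (i : Int) : Int := (hills.map (fun j => if j < i then j * j else 0)).sum
def agLH (hills : List Int) (i : Int) : Int := (hills.map (fun j => if j > i + 17 then (1 : Int) else 0)).sum
def agSH (hills : List Int) (i : Int) : Int := (hills.map (fun j => if j > i + 17 then j else 0)).sum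
def agSSH (hills : List Int) (i : Int) : Int := (hills.map (fun j => if j > i + 17 then j * j else 0)).sum

lemma count_int (hills : List Int) (v : Int) :
    ((hills.count v : Int)) = (hills.map (fun j => if j = v then (1 : Int) else 0)).sum := by
  induction hills with
  | nil => simp
  | cons j t ih =>
    by_cases h : j = v <;> simp [List.count_cons, h, ih] <;> omega

lemma agL_succ (hills : List Int) (i : Int) :
    agL hills (i + 1) = agL hills i + hills.count i := by
  rw [count_int]
  induction hills with
  | nil => simp [agL]
  | cons j t ih =>
    simp only [agL, List.map_cons, List.sum_cons] at ih ⊢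
    rw [ih]; split_ifs <;> (first | omega | (exfalso; omega) | ring1 | (subst_vars; ring1))

lemma agS_succ (hills : List Int) (i : Int) :
    agS hills (i + 1) = agS hills i + (hills.count i : Int) * i := by
  rw [count_int]
  induction hills with
  | nil => simp [agS]
  | cons j t ih =>
    simp only [agS, List.map_cons, List.sum_cons] at ih ⊢
    rw [ih]; split_ifs <;> (first | omega | (exfalso; omega) | ring1 | (subst_vars; ring1))

lemma agSS_succ (hills : List Int) (i : Int) :
    agSS hills (i + 1) = agSS hills i + (hills.count i : Int) * i * i := by
  rw [count_int]
  induction hills with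
  | nil => simp [agSS]
  | cons j t ih =>
    simp only [agSS, List.map_cons, List.sum_cons] at ih ⊢
    rw [ih]; split_ifs <;> (first | omega | (exfalso; omega) | ring1 | (subst_vars; ring1))

lemma agLH_succ (hills : List Int) (i : Int) :
    agLH hills (i + 1) = agLH hills i - hills.count (i + 18) := by
  rw [count_int]
  induction hills with
  | nil => simp [agLH]
  | cons j t ih =>
    simp only [agLH, List.map_cons, List.sum_cons] at ih ⊢
    rw [ih]; split_ifs <;> (first | omega | (exfalso; omega) | ring1 | (subst_vars; ring1))

lemma agSH_succ (hills : List Int) (i : Int) :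
    agSH hills (i + 1) = agSH hills i - (hills.count (i + 18) : Int) * (i + 18) := by
  rw [count_int]
  induction hills with
  | nil => simp [agSH]
  | cons j t ih =>
    simp only [agSH, List.map_cons, List.sum_cons] at ih ⊢
    rw [ih]; split_ifs <;> (first | omega | (exfalso; omega) | ring1 | (subst_vars; ring1))

lemma agSSH_succ (hills : List Int) (i : Int) :
    agSSH hills (i + 1) = agSSH hills i - (hills.count (i + 18) : Int) * (i + 18) * (i + 18) := by
  rw [count_int]
  induction hills with
  | nil => simp [agSSH]
  | cons j t ih =>
    simp only [agSSH, List.map_cons, List.sum_cons] at ih ⊢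
    rw [ih]; split_ifs <;> (first | omega | (exfalso; omega) | ring1 | (subst_vars; ring1))

lemma foldl_innerSum (hills : List Int) (i : Int) :
    ∀ acc : Int,
      hills.foldl (fun tc j => if j < i then tc + (i - j) ^ 2 else if j > i + 17 then tc + (i + 17 - j) ^ 2 else tc) acc
      = acc + (hills.map (fun j => if j < i then (i - j) ^ 2 else if j > i + 17 then (i + 17 - j) ^ 2 else 0)).sum := by
  induction hills with
  | nil => intro acc; simp
  | cons j t ih =>
    intro acc
    simp only [List.foldl_cons, List.map_cons, List.sum_cons]
    by_cases h1 : j < i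
    · rw [if_pos h1, if_pos h1, ih]; ring
    · by_cases h2 : j > i + 17
      · rw [if_neg h1, if_neg h1, if_pos h2, if_pos h2, ih]; ring
      · rw [if_neg h1, if_neg h1, if_neg h2, if_neg h2, ih]; ring

lemma sum_closed (hills : List Int) (i : Int) :
    (hills.map (fun j => if j < i then (i - j) ^ 2 else if j > i + 17 then (i + 17 - j) ^ 2 else 0)).sum
      = agL hills i * i * i - 2 * i * agS hills i + agSS hills i
        + agLH hills i * (i + 17) * (i + 17) - 2 * (i + 17) * agSH hills i + agSSH hills i := by
  induction hills with
  | nil => simp [agL, agS, agSS, agLH, agSH, agSSH]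
  | cons j t ih =>
    simp only [agL, agS, agSS, agLH, agSH, agSSH, List.map_cons, List.sum_cons] at ih ⊢
    rw [ih]; split_ifs <;> (first | omega | (exfalso; omega) | ring1 | (subst_vars; ring1))

lemma innerCost_closed (hills : List Int) (i : Int) :
    innerCost hills i =
      agL hills i * i * i - 2 * i * agS hills i + agSS hills i
      + agLH hills i * (i + 17) * (i + 17) - 2 * (i + 17) * agSH hills i + agSSH hills i := by
  unfold innerCost
  rw [foldl_innerSum hills i 0, sum_closed]
  ring

def optStep (hills : List Int) (o : Option Int) (i : Int) : Option Int :=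
  match o with
  | none => some (innerCost hills i)
  | some b => if innerCost hills i < b then some (innerCost hills i) else some b

lemma loopInv (hills : List Int) (hi0 : Int) :
    ∀ (fuel : Nat) (i : Int) (best : Option Int), (hi0 - i).toNat ≤ fuel →
      solveAltLoop hi0 (PySem.Dict.counter hills)
        (agL hills i) (agS hills i) (agSS hills i)
        (agLH hills i) (agSH hills i) (agSSH hills i) best i fuel
      = (PySem.List.pyRange i hi0 1).foldl (optStep hills) best := by
  intro fuel
  induction fuel with
  | zero =>
    intro i best hfb
    rw [PySem.List.pyRange_one_eq_nil (by omega)]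
    rfl
  | succ fuel ih =>
    intro i best hfb
    by_cases h : i < hi0
    · rw [PySem.List.pyRange_one_cons h, List.foldl_cons]
      simp only [solveAltLoop, if_pos h]
      rw [PySem.Dict.getD_counter, PySem.Dict.getD_counter,
          ← agL_succ, ← agS_succ, ← agSS_succ, ← agLH_succ, ← agSH_succ, ← agSSH_succ,
          ← innerCost_closed]
      have hopt : (match best with
          | none => some (innerCost hills i)
          | some b => if innerCost hills i < b then some (innerCost hills i) else some b)
          = optStep hills best i := rfl
      rw [hopt]
      exact ih (i + 1) _ (by omega)
    · rw [PySem.List.pyRange_one_eq_nil (by omega)]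
      simp only [solveAltLoop, if_neg h]
      rfl

lemma initAggs (hills : List Int) (lo0 : Int) :
    hills.foldl
      (fun (st : Int × Int × Int × Int × Int × Int) j =>
        if j < lo0 then (st.1 + 1, st.2.1 + j, st.2.2.1 + j * j, st.2.2.2.1, st.2.2.2.2.1, st.2.2.2.2.2)
        else if j > lo0 + 17 then (st.1, st.2.1, st.2.2.1, st.2.2.2.1 + 1, st.2.2.2.2.1 + j, st.2.2.2.2.2 + j * j)
        else st)
      ((0, 0, 0, 0, 0, 0) : Int × Int × Int × Int × Int × Int)
    = (agL hills lo0, agS hills lo0, agSS hills lo0, agLH hills lo0, agSH hills lo0, agSSH hills lo0) := by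
  have h : ∀ (l : List Int) (st : Int × Int × Int × Int × Int × Int),
      l.foldl
        (fun (st : Int × Int × Int × Int × Int × Int) j =>
          if j < lo0 then (st.1 + 1, st.2.1 + j, st.2.2.1 + j * j, st.2.2.2.1, st.2.2.2.2.1, st.2.2.2.2.2)
          else if j > lo0 + 17 then (st.1, st.2.1, st.2.2.1, st.2.2.2.1 + 1, st.2.2.2.2.1 + j, st.2.2.2.2.2 + j * j)
          else st) st
      = (st.1 + agL l lo0, st.2.1 + agS l lo0, st.2.2.1 + agSS l lo0,
         st.2.2.2.1 + agLH l lo0, st.2.2.2.2.1 + agSH l lo0, st.2.2.2.2.2 + agSSH l lo0) := by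
    intro l
    induction l with
    | nil => intro st; simp [agL, agS, agSS, agLH, agSH, agSSH]
    | cons j t iht =>
      intro st
      simp only [agL, agS, agSS, agLH, agSH, agSSH, List.map_cons, List.sum_cons, List.foldl_cons]
      by_cases h1 : j < lo0
      · rw [if_pos h1, iht]
        have h2 : ¬ j > lo0 + 17 := by omega
        simp only [agL, agS, agSS, agLH, agSH, agSSH, if_pos h1, if_neg h2, Prod.mk.injEq]
        refine ⟨by ring, by ring, by ring, by ring, by ring, by ring⟩
      · rw [if_neg h1]
        by_cases h2 : j > lo0 + 17
        · rw [if_pos h2, iht]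
          simp only [agL, agS, agSS, agLH, agSH, agSSH, if_pos h2, if_neg h1, Prod.mk.injEq]
          refine ⟨by ring, by ring, by ring, by ring, by ring, by ring⟩
        · rw [if_neg h2, iht]
          simp only [agL, agS, agSS, agLH, agSH, agSSH, if_neg h2, if_neg h1, Prod.mk.injEq]
          refine ⟨by ring, by ring, by ring, by ring, by ring, by ring⟩
  rw [h]
  simp

lemma optFold_some (hills : List Int) :
    ∀ (l : List Int) (acc : Int),
      l.foldl (optStep hills) (some acc)
      = some (l.foldl (fun c i => if innerCost hills i < c then innerCost hills i else c) acc) := by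
  intro l
  induction l with
  | nil => intro acc; rfl
  | cons x t ih =>
    intro acc
    simp only [List.foldl_cons]
    have h : optStep hills (some acc) x
        = some (if innerCost hills x < acc then innerCost hills x else acc) := by
      simp only [optStep]; split_ifs <;> rfl
    rw [h, ih]


-- ===== VERDICT (by name: the statement is the Claim_ definition above) =====
theorem solve_spec : Claim_equal_solve := by
  intro n hills _ _
  unfold Spec_solve
  simp only [solve, solve_alt]
  by_cases hcmp : (PySem.List.pyGet? hills 0).getD 0 ≥ (PySem.List.pyGet? hills (-1)).getD 0 - 16
  · rw [if_pos hcmp, PySem.List.pyRange_one_eq_nil (by omega)]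
    rfl
  · rw [if_neg hcmp]
    have hlt : (PySem.List.pyGet? hills 0).getD 0 < (PySem.List.pyGet? hills (-1)).getD 0 - 16 := by omega
    rw [PySem.Dict.foldl_insert_getD_add_one_eq_counter, initAggs]
    rw [loopInv hills _ _ _ none (le_refl _)]
    rw [PySem.List.pyRange_one_cons hlt]
    simp only [List.foldl_cons, eq_self_iff_true, ite_true]
    rw [show optStep hills none ((PySem.List.pyGet? hills 0).getD 0)
          = some (innerCost hills ((PySem.List.pyGet? hills 0).getD 0)) from rfl]
    rw [optFold_some, Option.getD_some]
    apply PySem.List.foldl_congr_mem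
    intro acc x hx
    have hmem := (PySem.List.mem_pyRange_one.mp hx).1
    rw [if_neg (by omega)]
    rfl
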